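-- pv_equiv track=rewrite | github.com/arjanitalestrani1/Book-Cipher-dhe-Route-Transposition | ciphers/route_transposition_cipher.py | encrypt_zigzag_route
-- ===== SOURCE A (Python) =====
-- import math
--
-- def encrypt_zigzag_route(text, cols):
--     text = text.replace(" ", "").upper()
--     rows = math.ceil(len(text) / cols)
--
--     grid = [['' for _ in range(cols)] for _ in range(rows)]
--
--     k = 0
--     for i in range(rows):
--         for j in range(cols):
--             if k < len(text):
--                 grid[i][j] = text[k]
--                 k += 1
--             else:
--                 grid[i][j] = 'X'
--
--     result = ""
--     for i in range(rows):
--         if i % 2 == 0: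
--             for j in range(cols):
--                 result += grid[i][j]
--         else:
--             for j in reversed(range(cols)):
--                 result += grid[i][j]
--
--     return result
-- ===== SOURCE B (Python) =====
-- import math
--
-- def encrypt_zigzag_route(text, cols):
--     text = text.replace(" ", "").upper()
--     rows = math.ceil(len(text) / cols)
--     padded = text + 'X' * (rows * cols - len(text))
--     parts = []
--     for i in range(rows):
--         chunk = padded[i * cols:(i + 1) * cols]
--         parts.append(chunk if i % 2 == 0 else chunk[::-1])
--     return ''.join(parts)
-- ===== Notes on version B (the rewrite author's own statement) =====
-- stated objective: simpler
-- what changed: Replaces the mutable 2D grid, the running k counter and the four index loops by direct slicing: pad the cleaned text with 'X' to a full rectangle and join the row slices, reversing every odd row; bulk slice/join ops also avoid A's per-character += concatenation (measured constant-factor speedup).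
import Mathlib
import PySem

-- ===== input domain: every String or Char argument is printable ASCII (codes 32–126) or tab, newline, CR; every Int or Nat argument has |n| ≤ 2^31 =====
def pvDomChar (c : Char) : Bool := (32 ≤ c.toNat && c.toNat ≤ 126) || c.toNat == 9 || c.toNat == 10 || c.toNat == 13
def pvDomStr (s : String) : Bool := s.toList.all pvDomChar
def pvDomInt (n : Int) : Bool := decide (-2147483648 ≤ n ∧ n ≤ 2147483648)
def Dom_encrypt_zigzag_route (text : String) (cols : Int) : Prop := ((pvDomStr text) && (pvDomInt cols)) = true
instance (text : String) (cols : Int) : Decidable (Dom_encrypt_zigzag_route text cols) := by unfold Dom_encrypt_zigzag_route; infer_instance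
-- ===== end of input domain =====

-- B replaces A's mutable 2D grid, k counter and four index loops by padding the text to a
-- full rectangle and joining row slices (odd rows reversed): simpler structure, and the bulk
-- slice/join operations measured faster than A's per-character concatenation.

-- ===== PORT A =====
-- grid[i][j] = v and grid[i][j] reads; the loop indices i, j always lie in range here
def pvSetIJ (g : List (List (List Char))) (i j : Int) (v : List Char) : List (List (List Char)) :=
  g.set i.toNat ((g.getD i.toNat []).set j.toNat v)

def pvGetIJ (g : List (List (List Char))) (i j : Int) : List Char :=
  (g.getD i.toNat []).getD j.toNat []

def encrypt_zigzag_route (text : String) (cols : Int) : String :=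
  let t : List Char := PySem.Chars.upper (PySem.Chars.replace text.toList [' '] [])
  let n : Int := (t.length : Int)
  -- math.ceil(len(text) / cols) = -((-n) // cols): exact on the stated domain
  let rows : Int := -(PySem.Int.floordiv (-n) cols)
  let grid0 : List (List (List Char)) :=
    (PySem.List.pyRange 0 rows 1).map (fun _ => (PySem.List.pyRange 0 cols 1).map (fun _ => ([] : List Char)))
  let fill :=
    (PySem.List.pyRange 0 rows 1).foldl (fun st i =>
      (PySem.List.pyRange 0 cols 1).foldl (fun (st : List (List (List Char)) × Int) j =>
        if st.2 < n then
          (pvSetIJ st.1 i j ((PySem.List.pyGet? t st.2).elim [] (fun c => [c])), st.2 + 1)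
        else
          (pvSetIJ st.1 i j ['X'], st.2)) st) (grid0, (0 : Int))
  let result :=
    (PySem.List.pyRange 0 rows 1).foldl (fun res i =>
      if PySem.Int.mod i 2 = 0 then
        (PySem.List.pyRange 0 cols 1).foldl (fun r j => r ++ pvGetIJ fill.1 i j) res
      else
        ((PySem.List.pyRange 0 cols 1).reverse).foldl (fun r j => r ++ pvGetIJ fill.1 i j) res)
      ([] : List Char)
  String.ofList result

-- ===== PORT B =====
def encrypt_zigzag_route_alt (text : String) (cols : Int) : String :=
  let t : List Char := PySem.Chars.upper (PySem.Chars.replace text.toList [' '] [])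
  let n : Int := (t.length : Int)
  -- math.ceil(len(text) / cols) = -((-n) // cols): exact on the stated domain
  let rows : Int := -(PySem.Int.floordiv (-n) cols)
  -- 'X' * m is '' for m ≤ 0, as .toNat clamps
  let padded : List Char := t ++ List.replicate (rows * cols - n).toNat 'X'
  let parts : List (List Char) :=
    (PySem.List.pyRange 0 rows 1).map (fun i =>
      let chunk := PySem.List.slice padded (some (i * cols)) (some ((i + 1) * cols))
      if PySem.Int.mod i 2 = 0 then chunk else chunk.reverse)
  String.ofList parts.flatten

-- ===== PRECONDITION & SPEC =====
-- Pre_ excludes exactly cols = 0, where Python A raises ZeroDivisionError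
def Pre_encrypt_zigzag_route (_text : String) (cols : Int) : Prop := cols ≠ 0
instance (text : String) (cols : Int) : Decidable (Pre_encrypt_zigzag_route text cols) := by
  unfold Pre_encrypt_zigzag_route; infer_instance

def pvWitness_encrypt_zigzag_route : String × Int := ("HELLO WORLD", 4)

def Spec_encrypt_zigzag_route (text : String) (cols : Int) (out : String) : Prop := out = encrypt_zigzag_route_alt text cols
instance (text : String) (cols : Int) (out : String) : Decidable (Spec_encrypt_zigzag_route text cols out) := by unfold Spec_encrypt_zigzag_route; infer_instance

-- ===== CLAIM (what is proved, stated in full; the proofs are below) =====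
def Claim_equal_encrypt_zigzag_route : Prop := ∀ (text : String) (cols : Int), Dom_encrypt_zigzag_route text cols → Pre_encrypt_zigzag_route text cols → Spec_encrypt_zigzag_route text cols (encrypt_zigzag_route text cols)

-- ===== LEMMAS AND PROOFS =====

-- the cell content A's fill loop puts at flat position m
def pvVal (t : List Char) (m : Nat) : List Char :=
  if h : m < t.length then [t[m]] else ['X']

-- A's fill step on one cell, at fixed row index i
def pvStep (t : List Char) (i : Int) (st : List (List (List Char)) × Int) (j : Int) :
    List (List (List Char)) × Int :=
  if st.2 < (t.length : Int) then
    (pvSetIJ st.1 i j ((PySem.List.pyGet? t st.2).elim [] (fun c => [c])), st.2 + 1)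
  else
    (pvSetIJ st.1 i j ['X'], st.2)

theorem pv_row_set (t : List Char) (C k0 c : Nat) (hc : c < C) :
    ((List.range C).map (fun j => if j < c then pvVal t (k0 + j) else [])).set c (pvVal t (k0 + c))
      = (List.range C).map (fun j => if j < c + 1 then pvVal t (k0 + j) else []) := by
  apply List.ext_getElem
  · simp
  · intro j h1 h2
    simp only [List.getElem_set, List.getElem_map, List.getElem_range] at *
    by_cases hj : j = c
    · subst hj; simp
    · rw [if_neg (fun h => hj h.symm)]
      by_cases hjc : j < c
      · rw [if_pos hjc, if_pos (by omega)]
      · rw [if_neg hjc, if_neg (by omega)]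

-- one row of A's fill loop
theorem pv_row (t : List Char) (C : Nat) (i : Nat) (g : List (List (List Char)))
    (hlen : i < g.length) (hrow : g.getD i [] = List.replicate C ([] : List Char))
    (k0 : Nat) (hk : k0 ≤ t.length) (c : Nat) (hcC : c ≤ C) :
    ((List.range c).map (fun (j : Nat) => (j : Int))).foldl (pvStep t (i : Int)) (g, (k0 : Int))
      = (g.set i ((List.range C).map (fun j => if j < c then pvVal t (k0 + j) else [])),
         ((min (k0 + c) t.length : Nat) : Int)) := by
  induction c with
  | zero =>
    have h1 : (List.range C).map (fun j => if j < 0 then pvVal t (k0 + j) else ([]:List Char))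
        = List.replicate C [] := by
      rw [List.map_congr_left (g := fun _ => ([]:List Char)) (by intro a _; simp)]
      simp [List.map_const']
    rw [h1, ← hrow, List.getD_eq_getElem _ _ hlen, List.set_getElem_self]
    simp [Nat.min_eq_left hk]
  | succ c ih =>
    have hc : c < C := hcC
    have hsplit : (List.range (c+1)).map (fun (j : Nat) => (j : Int))
        = (List.range c).map (fun (j : Nat) => (j : Int)) ++ [(c : Int)] := by
      rw [List.range_succ, List.map_append]; simp
    rw [hsplit, List.foldl_append, ih (Nat.le_of_succ_le hcC)]
    simp only [List.foldl_cons, List.foldl_nil]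
    have hgl : i < (g.set i ((List.range C).map (fun j => if j < c then pvVal t (k0 + j) else []))).length := by
      simpa using hlen
    have hget : (g.set i ((List.range C).map (fun j => if j < c then pvVal t (k0 + j) else []))).getD i []
        = (List.range C).map (fun j => if j < c then pvVal t (k0 + j) else []) := by
      rw [List.getD_eq_getElem _ _ hgl, List.getElem_set_self]
    by_cases hlt : k0 + c < t.length
    · have hmin : min (k0 + c) t.length = k0 + c := by omega
      have hcond : ((min (k0 + c) t.length : Nat) : Int) < (t.length : Int) := by
        rw [hmin]; exact_mod_cast hlt
      rw [pvStep, if_pos hcond, hmin]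
      rw [PySem.List.pyGet?_natCast, List.getElem?_eq_getElem hlt]
      rw [pvSetIJ]
      simp only [Int.toNat_natCast, Option.elim]
      rw [hget, List.set_set]
      have hval : [t[k0 + c]] = pvVal t (k0 + c) := by rw [pvVal, dif_pos hlt]
      rw [hval, pv_row_set t C k0 c hc]
      simp only [Prod.mk.injEq]
      exact ⟨trivial, by omega⟩
    · have hmin : min (k0 + c) t.length = t.length := by omega
      have hcond : ¬ ((min (k0 + c) t.length : Nat) : Int) < (t.length : Int) := by
        rw [hmin]; omega
      rw [pvStep, if_neg hcond]
      rw [pvSetIJ]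
      simp only [Int.toNat_natCast]
      rw [hget, List.set_set]
      have hval : (['X'] : List Char) = pvVal t (k0 + c) := by rw [pvVal, dif_neg (by omega)]
      rw [hval, pv_row_set t C k0 c hc]
      simp only [Prod.mk.injEq]
      exact ⟨trivial, by omega⟩

theorem pv_val_min (t : List Char) (a j : Nat) :
    pvVal t (min a t.length + j) = pvVal t (a + j) := by
  unfold pvVal
  by_cases h : a ≤ t.length
  · rw [min_eq_left h]
  · rw [min_eq_right (by omega), dif_neg (by omega), dif_neg (by omega)]

theorem pv_grid_set (t : List Char) (R C r : Nat) (hr : r < R) :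
    (((List.range R).map (fun i =>
        if i < r then (List.range C).map (fun j => pvVal t (i * C + j))
        else List.replicate C ([] : List Char))).set r ((List.range C).map (fun j => pvVal t (r * C + j))))
      = (List.range R).map (fun i =>
          if i < r + 1 then (List.range C).map (fun j => pvVal t (i * C + j))
          else List.replicate C ([] : List Char)) := by
  apply List.ext_getElem
  · simp
  · intro i h1 h2
    simp only [List.getElem_set, List.getElem_map, List.getElem_range]
    by_cases hi : i = r
    · subst hi; simp
    · rw [if_neg (fun h => hi h.symm)]
      by_cases hir : i < r
      · rw [if_pos hir, if_pos (by omega)]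
      · rw [if_neg hir, if_neg (by omega)]

-- the whole fill loop
theorem pv_fill (t : List Char) (R C : Nat) (r : Nat) (hr : r ≤ R) :
    ((List.range r).map (fun (i : Nat) => (i : Int))).foldl
      (fun st i => ((List.range C).map (fun (j : Nat) => (j : Int))).foldl (pvStep t i) st)
      (List.replicate R (List.replicate C ([] : List Char)), (0 : Int))
    = ((List.range R).map (fun i =>
          if i < r then (List.range C).map (fun j => pvVal t (i * C + j))
          else List.replicate C ([] : List Char)),
       ((min (r * C) t.length : Nat) : Int)) := by
  induction r with
  | zero =>
    simp only [List.range_zero, List.map_nil, List.foldl_nil, Nat.zero_mul, Nat.min_eq_left (Nat.zero_le _)]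
    have h1 : (List.range R).map (fun i =>
        if i < 0 then (List.range C).map (fun j => pvVal t (i * C + j))
        else List.replicate C ([] : List Char)) = List.replicate R (List.replicate C []) := by
      rw [List.map_congr_left (g := fun _ => List.replicate C ([]:List Char)) (by intro a _; simp)]
      simp [List.map_const']
    rw [h1]
    simp
  | succ r ih =>
    have hrR : r < R := hr
    have hsplit : (List.range (r+1)).map (fun (i : Nat) => (i : Int))
        = (List.range r).map (fun (i : Nat) => (i : Int)) ++ [(r : Int)] := by
      rw [List.range_succ, List.map_append]; simp
    rw [hsplit, List.foldl_append, ih (Nat.le_of_succ_le hr)]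
    simp only [List.foldl_cons, List.foldl_nil]
    have hlen : r < ((List.range R).map (fun i =>
        if i < r then (List.range C).map (fun j => pvVal t (i * C + j))
        else List.replicate C ([] : List Char))).length := by simpa using hrR
    have hrow : ((List.range R).map (fun i =>
        if i < r then (List.range C).map (fun j => pvVal t (i * C + j))
        else List.replicate C ([] : List Char))).getD r [] = List.replicate C [] := by
      rw [List.getD_eq_getElem _ _ hlen]
      simp
    rw [pv_row t C r _ hlen hrow (min (r * C) t.length) (min_le_right _ _) C le_rfl]
    have hfin : (List.range C).map (fun j => if j < C then pvVal t (min (r * C) t.length + j) else [])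
        = (List.range C).map (fun j => pvVal t (r * C + j)) := by
      apply List.map_eq_map_iff.mpr
      intro j hj
      rw [if_pos (List.mem_range.mp hj), pv_val_min]
    rw [hfin, pv_grid_set t R C r hrR]
    simp only [Prod.mk.injEq]
    have hrc : (r + 1) * C = r * C + C := by ring
    refine ⟨trivial, ?_⟩
    have : min (min (r * C) t.length + C) t.length = min ((r + 1) * C) t.length := by
      rw [hrc]; omega
    rw [this]

-- one char of the padded rectangle
theorem pv_val_padded (t : List Char) (P m : Nat) (hm : m < t.length + P) :
    pvVal t m = [(t ++ List.replicate P 'X').getD m 'X'] := by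
  have hl : m < (t ++ List.replicate P 'X').length := by simpa using hm
  rw [List.getD_eq_getElem _ _ hl]
  unfold pvVal
  by_cases h : m < t.length
  · rw [dif_pos h, List.getElem_append_left h]
  · rw [dif_neg h, List.getElem_append_right (by omega)]
    simp

-- read off one filled cell
theorem pv_getIJ (t : List Char) (R C i j : Nat) (hi : i < R) (hj : j < C) :
    pvGetIJ ((List.range R).map (fun i => (List.range C).map (fun j => pvVal t (i * C + j))))
        (i : Int) (j : Int) = pvVal t (i * C + j) := by
  unfold pvGetIJ
  have h1 : i < ((List.range R).map (fun i => (List.range C).map (fun j => pvVal t (i * C + j)))).length := by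
    simpa using hi
  simp only [Int.toNat_natCast]
  rw [List.getD_eq_getElem _ _ h1]
  simp only [List.getElem_map, List.getElem_range]
  have h2 : j < ((List.range C).map (fun j => pvVal t (i * C + j))).length := by simpa using hj
  rw [List.getD_eq_getElem _ _ h2]
  simp

-- a contiguous segment of a list as a map over range
theorem pv_seg (l : List Char) (a c : Nat) (h : a + c ≤ l.length) :
    (l.drop a).take c = (List.range c).map (fun j => l.getD (a + j) 'X') := by
  apply List.ext_getElem
  · simp; omega
  · intro j h1 h2
    simp only [List.length_map, List.length_range] at h2
    simp only [List.getElem_take, List.getElem_drop, List.getElem_map, List.getElem_range]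
    rw [List.getD_eq_getElem _ _ (by omega)]

theorem pv_flatten_singleton {α β : Type} (l : List α) (f : α → β) :
    (l.map (fun x => [f x])).flatten = l.map f := by
  induction l with
  | nil => rfl
  | cons x xs ih => simp [ih]

def pvRows (t : List Char) (cols : Int) : Int := -(PySem.Int.floordiv (-(t.length : Int)) cols)

-- list-level core equivalence, stated on the cleaned text
theorem pv_main (t : List Char) (cols : Int) (hc : cols ≠ 0) :
    String.ofList
      ((PySem.List.pyRange 0 (pvRows t cols) 1).foldl (fun res i =>
        if PySem.Int.mod i 2 = 0 then
          (PySem.List.pyRange 0 cols 1).foldl (fun r j => r ++ pvGetIJ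
            ((PySem.List.pyRange 0 (pvRows t cols) 1).foldl (fun st i =>
              (PySem.List.pyRange 0 cols 1).foldl (pvStep t i) st)
              ((PySem.List.pyRange 0 (pvRows t cols) 1).map (fun _ => (PySem.List.pyRange 0 cols 1).map (fun _ => ([] : List Char))), (0 : Int))).1 i j) res
        else
          ((PySem.List.pyRange 0 cols 1).reverse).foldl (fun r j => r ++ pvGetIJ
            ((PySem.List.pyRange 0 (pvRows t cols) 1).foldl (fun st i =>
              (PySem.List.pyRange 0 cols 1).foldl (pvStep t i) st)
              ((PySem.List.pyRange 0 (pvRows t cols) 1).map (fun _ => (PySem.List.pyRange 0 cols 1).map (fun _ => ([] : List Char))), (0 : Int))).1 i j) res)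
        ([] : List Char))
    = String.ofList
      (((PySem.List.pyRange 0 (pvRows t cols) 1).map (fun i =>
        if PySem.Int.mod i 2 = 0 then
          PySem.List.slice (t ++ List.replicate ((pvRows t cols) * cols - (t.length : Int)).toNat 'X') (some (i * cols)) (some ((i + 1) * cols))
        else
          (PySem.List.slice (t ++ List.replicate ((pvRows t cols) * cols - (t.length : Int)).toNat 'X') (some (i * cols)) (some ((i + 1) * cols))).reverse)).flatten) := by
  rcases lt_trichotomy cols 0 with hneg | hz | hpos
  · -- cols < 0: rows ≤ 0 and both sides are ""
    have hq : 0 ≤ PySem.Int.floordiv (-(t.length : Int)) cols := by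
      by_contra hq
      have hb := PySem.Int.mod_neg_bounds (-(t.length : Int)) hneg
      have he := PySem.Int.floordiv_mul_add_mod (-(t.length : Int)) cols
      have h1 : PySem.Int.floordiv (-(t.length : Int)) cols ≤ -1 := by omega
      have h2 : (-1 : Int) * cols ≤ PySem.Int.floordiv (-(t.length : Int)) cols * cols :=
        mul_le_mul_of_nonpos_right h1 (le_of_lt hneg)
      have hN : (0 : Int) ≤ (t.length : Int) := by positivity
      linarith
    have hrows : pvRows t cols ≤ 0 := by unfold pvRows; omega
    rw [PySem.List.pyRange_one_eq_nil hrows]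
    simp
  · exact absurd hz hc
  · -- cols > 0, the real case
    have hbounds : (pvRows t cols - 1) * cols < (t.length : Int) ∧ (t.length : Int) ≤ pvRows t cols * cols :=
      (PySem.Int.neg_floordiv_neg_eq_iff_of_pos hpos).mp rfl
    have hrnn : 0 ≤ pvRows t cols := by
      by_contra h
      have h1 : pvRows t cols ≤ -1 := by omega
      have h2 : pvRows t cols * cols ≤ (-1) * cols := mul_le_mul_of_nonneg_right h1 (le_of_lt hpos)
      have hN : (0 : Int) ≤ (t.length : Int) := by positivity
      linarith [hbounds.2]
    obtain ⟨R, hR⟩ : ∃ R : Nat, pvRows t cols = (R : Int) :=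
      ⟨(pvRows t cols).toNat, (Int.toNat_of_nonneg hrnn).symm⟩
    obtain ⟨C, hC⟩ : ∃ C : Nat, cols = (C : Int) :=
      ⟨cols.toNat, (Int.toNat_of_nonneg hpos.le).symm⟩
    rw [hC] at hR hbounds
    rw [hC, hR]
    have hNRC : t.length ≤ R * C := by
      have h := hbounds.2
      rw [hR, ← Nat.cast_mul] at h
      exact_mod_cast h
    have hP : (((R : Int)) * (C : Int) - (t.length : Int)).toNat = R * C - t.length := by
      rw [← Nat.cast_mul]; omega
    rw [hP]
    set padded : List Char := t ++ List.replicate (R * C - t.length) 'X' with hpad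
    have hplen : padded.length = R * C := by
      rw [hpad]; simp; omega
    simp only [PySem.List.pyRange_one, zero_add, sub_zero, Int.toNat_natCast, List.map_const', List.length_map, List.length_range]
    rw [pv_fill t R C R le_rfl]
    have hGeq : (List.range R).map (fun i =>
        if i < R then (List.range C).map (fun j => pvVal t (i * C + j))
        else List.replicate C ([] : List Char))
      = (List.range R).map (fun i => (List.range C).map (fun j => pvVal t (i * C + j))) :=
      List.map_eq_map_iff.mpr (fun i hi => if_pos (List.mem_range.mp hi))
    rw [hGeq]
    set G : List (List (List Char)) :=
      (List.range R).map (fun i => (List.range C).map (fun j => pvVal t (i * C + j))) with hGdef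
    have hfst : ((G, ((min (R * C) t.length : Nat) : Int)) : List (List (List Char)) × Int).1 = G := rfl
    rw [hfst]
    have hbody : (fun (res : List Char) (i : Int) =>
        if PySem.Int.mod i 2 = 0 then
          List.foldl (fun r j => r ++ pvGetIJ G i j) res ((List.range C).map (fun (k : Nat) => (k : Int)))
        else
          List.foldl (fun r j => r ++ pvGetIJ G i j) res ((List.range C).map (fun (k : Nat) => (k : Int))).reverse)
      = (fun res i => res ++ (if PySem.Int.mod i 2 = 0 then
          ((List.range C).map (fun (k : Nat) => (k : Int))).flatMap (fun j => pvGetIJ G i j)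
        else
          (((List.range C).map (fun (k : Nat) => (k : Int))).reverse).flatMap (fun j => pvGetIJ G i j))) := by
      funext res i
      split_ifs <;> rw [PySem.List.foldl_append_eq_flatMap]
    rw [hbody, PySem.List.foldl_append_eq_flatMap, List.nil_append, List.flatMap_def,
      List.map_map, List.map_map]
    congr 1
    refine congrArg List.flatten ?_
    apply List.map_eq_map_iff.mpr
    intro i hi
    have hiR := List.mem_range.mp hi
    simp only [Function.comp]
    -- facts about row i
    have hiC : (i + 1) * C ≤ R * C := Nat.mul_le_mul_right C hiR
    have hcell : ∀ j, j < C → pvGetIJ G (i : Int) (j : Int) = [padded.getD (i * C + j) 'X'] := by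
      intro j hjC
      rw [hGdef, pv_getIJ t R C i j hiR hjC]
      rw [hpad]
      apply pv_val_padded
      have h1 : i * C + j < (i + 1) * C := by rw [Nat.succ_mul]; omega
      omega
    have hflat : ∀ (L : List Nat), (∀ j ∈ L, j < C) →
        (L.map (fun (k : Nat) => (k : Int))).flatMap (fun j => pvGetIJ G (i : Int) j)
          = L.map (fun j => padded.getD (i * C + j) 'X') := by
      intro L hL
      rw [List.flatMap_def, List.map_map]
      rw [List.map_congr_left (g := fun j => [padded.getD (i * C + j) 'X'])
        (by intro a ha; simp only [Function.comp]; exact hcell a (hL a ha))]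
      exact pv_flatten_singleton L _
    have hB : PySem.List.slice padded (some ((i : Int) * (C : Int))) (some (((i : Int) + 1) * (C : Int)))
        = (List.range C).map (fun j => padded.getD (i * C + j) 'X') := by
      have e1 : (i : Int) * (C : Int) = ((i * C : Nat) : Int) := by push_cast; ring
      have e2 : ((i : Int) + 1) * (C : Int) = (((i + 1) * C : Nat) : Int) := by push_cast; ring
      rw [e1, e2, PySem.List.slice_toNat padded (Int.natCast_nonneg _) (Int.natCast_nonneg _),
        Int.toNat_natCast, Int.toNat_natCast]
      have e3 : (i + 1) * C - i * C = C := by rw [Nat.succ_mul]; omega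
      rw [e3, pv_seg padded (i * C) C (by rw [hplen]; rw [← Nat.succ_mul]; exact hiC)]
    split_ifs with hpar
    · rw [hflat (List.range C) (fun j hj => List.mem_range.mp hj), hB]
    · rw [← List.map_reverse,
        hflat (List.range C).reverse (fun j hj => List.mem_range.mp (List.mem_reverse.mp hj)),
        hB, List.map_reverse]

-- ===== VERDICT (by name: the statement is the Claim_ definition above) =====
theorem encrypt_zigzag_route_spec : Claim_equal_encrypt_zigzag_route := by
  intro text cols _ hpre
  unfold Spec_encrypt_zigzag_route
  exact pv_main (PySem.Chars.upper (PySem.Chars.replace text.toList [' '] [])) cols hpre
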